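-- pv_equiv track=rewrite | github.com/pooi/SpeechRecognition | speech.py | getAccumulateList
-- ===== SOURCE A (Python) =====
-- def getAccumulateList(graph):
--     accumulateGraph = []
--     for i in range(len(graph)):
--         accumulateGraph.append(abs(graph[i]))
--
--     for i in range(len(accumulateGraph)):
--         if i > 0:
--             accumulateGraph[i] = accumulateGraph[i] + accumulateGraph[i - 1]
--
--     return accumulateGraph
-- ===== SOURCE B (Python) =====
-- def getAccumulateList(graph):
--     # Backwards construction: compute the grand total of abs values once,
--     # then emit the prefix sums back-to-front by subtracting each abs value.
--     total = sum(abs(x) for x in graph)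
--     out = []
--     for x in reversed(graph):
--         out.append(total)
--         total -= abs(x)
--     out.reverse()
--     return out
-- ===== Notes on version B (the rewrite author's own statement) =====
-- stated objective: alternative
-- what changed: Instead of A's forward cumulative sum over an abs list, B first computes the grand total of absolute values, then builds the output back-to-front by walking the list in reverse and subtracting each abs value from the running total, reversing the collected list at the end.
import Mathlib
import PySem

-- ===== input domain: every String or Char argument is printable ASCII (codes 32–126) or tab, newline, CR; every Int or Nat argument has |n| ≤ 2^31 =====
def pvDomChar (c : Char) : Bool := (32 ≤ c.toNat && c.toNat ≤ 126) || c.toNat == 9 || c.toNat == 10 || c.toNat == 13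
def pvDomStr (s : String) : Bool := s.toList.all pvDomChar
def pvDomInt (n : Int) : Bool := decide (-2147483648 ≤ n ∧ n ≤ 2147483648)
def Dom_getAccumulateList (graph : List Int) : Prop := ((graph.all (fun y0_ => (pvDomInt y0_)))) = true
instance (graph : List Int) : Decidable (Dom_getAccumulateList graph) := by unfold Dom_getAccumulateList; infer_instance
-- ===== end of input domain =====

-- B replaces A's forward cumulative sum by a backwards construction: grand total first, then subtract abs values walking the list in reverse (objective: alternative).

-- ===== PORT A =====
-- first loop: for i in range(len(graph)): accumulateGraph.append(abs(graph[i]))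
-- (graph.getD i 0: index i is always in range here, so this matches graph[i] exactly)
-- second loop: for i in range(len(accumulateGraph)): if i > 0: a[i] = a[i] + a[i-1]
def getAccumulateList (graph : List Int) : List Int :=
  let accumulateGraph :=
    (List.range graph.length).foldl (fun acc i => acc ++ [|graph.getD i 0|]) []
  (List.range accumulateGraph.length).foldl
    (fun a i => if i > 0 then a.set i (a.getD i 0 + a.getD (i - 1) 0) else a)
    accumulateGraph

-- ===== PORT B =====
-- total = sum(abs(x) for x in graph); then for x in reversed(graph): append total; total -= abs(x); finally out.reverse()
def getAccumulateList_alt (graph : List Int) : List Int :=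
  ((graph.reverse.foldl
      (fun (p : List Int × Int) x => (p.1 ++ [p.2], p.2 - |x|))
      (([] : List Int), graph.foldl (fun s x => s + |x|) 0)).1).reverse

-- ===== PRECONDITION & SPEC =====
def Spec_getAccumulateList (graph : List Int) (out : List Int) : Prop := out = getAccumulateList_alt graph
instance (graph : List Int) (out : List Int) : Decidable (Spec_getAccumulateList graph out) := by unfold Spec_getAccumulateList; infer_instance

-- ===== CLAIM (what is proved, stated in full; the proofs are below) =====
def Claim_equal_getAccumulateList : Prop := ∀ (graph : List Int), Dom_getAccumulateList graph → Spec_getAccumulateList graph (getAccumulateList graph)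

-- ===== LEMMAS AND PROOFS =====

-- canonical prefix-sum form both ports are reduced to
def pfx (s : Int) : List Int → List Int
  | [] => []
  | x :: xs => (s + x) :: pfx (s + x) xs

-- A's first loop builds the abs-map
theorem loopA1 (graph : List Int) : ∀ (pre : List Int) (acc : List Int),
    (List.range' pre.length graph.length).foldl
      (fun a i => a ++ [|(pre ++ graph).getD i 0|]) acc
      = acc ++ graph.map (fun x => |x|) := by
  induction graph with
  | nil => simp
  | cons x xs ih =>
    intro pre acc
    have h1 : (pre ++ x :: xs).getD pre.length 0 = x := by
      simp
    have h2 : pre ++ x :: xs = (pre ++ [x]) ++ xs := by simp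
    have h3 := ih (pre ++ [x]) (acc ++ [|x|])
    simp only [List.length_cons, List.range'_succ, List.foldl_cons, h1]
    rw [h2]
    simpa [Nat.add_comm] using h3

-- A's second loop, past the first index, turns the not-yet-processed suffix into prefix sums
theorem loopA2 (rest : List Int) : ∀ (done : List Int) (s : Int),
    done ≠ [] → done.getLast? = some s →
    (List.range' done.length rest.length).foldl
      (fun a i => if i > 0 then a.set i (a.getD i 0 + a.getD (i - 1) 0) else a)
      (done ++ rest)
      = done ++ pfx s rest := by
  induction rest with
  | nil => simp [pfx]
  | cons x xs ih =>
    intro done s hne hlast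
    have hpos : 0 < done.length := List.length_pos_iff.mpr hne
    have hget : (done ++ x :: xs).getD done.length 0 = x := by
      simp
    have hget' : (done ++ x :: xs).getD (done.length - 1) 0 = s := by
      rw [List.getD_append _ _ _ _ (by omega)]
      have : done.getD (done.length - 1) 0 = s := by
        rw [List.getD_eq_getElem _ _ (by omega)]
        have := List.getLast?_eq_getElem? (l := done)
        rw [hlast] at this
        have h2 : done[done.length - 1]? = some s := this.symm
        simpa [List.getElem?_eq_getElem (by omega : done.length - 1 < done.length)] using h2
      exact this
    have hset : (done ++ x :: xs).set done.length (x + s) = (done ++ [x + s]) ++ xs := by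
      rw [List.set_append_right _ _ (by omega)]
      simp
    have ih' := ih (done ++ [x + s]) (x + s) (by simp) (by simp)
    simp only [List.length_cons, List.range'_succ, List.foldl_cons,
      if_pos (by omega : done.length > 0), hget, hget', hset]
    simp only [List.length_append, List.length_cons, List.length_nil] at ih' ⊢
    simpa [pfx, Int.add_comm] using ih'

-- B's first pass: the grand total is the sum of the abs-map
theorem sumAbs (graph : List Int) : ∀ (s : Int),
    graph.foldl (fun s x => s + |x|) s = s + (graph.map (fun x => |x|)).sum := by
  induction graph with
  | nil => simp
  | cons x xs ih => intro s; simp [ih, Int.add_assoc]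

-- B's reverse walk yields the prefix sums of the abs-map, back-to-front
theorem loopB (graph : List Int) : ∀ (acc : List Int) (s : Int),
    graph.reverse.foldl
      (fun (p : List Int × Int) x => (p.1 ++ [p.2], p.2 - |x|)) (acc, s)
      = (acc ++ (pfx (s - (graph.map (fun x => |x|)).sum) (graph.map (fun x => |x|))).reverse,
         s - (graph.map (fun x => |x|)).sum) := by
  induction graph with
  | nil => simp [pfx]
  | cons x xs ih =>
    intro acc s
    rw [List.reverse_cons, List.foldl_append, ih]
    simp only [List.foldl_cons, List.foldl_nil, List.map_cons, List.sum_cons, pfx]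
    have h : s - (|x| + (xs.map (fun x => |x|)).sum) + |x|
        = s - (xs.map (fun x => |x|)).sum := by ring
    rw [h]
    refine Prod.ext ?_ ?_
    · simp
    · simp; ring

theorem ports_eq (graph : List Int) : getAccumulateList graph = getAccumulateList_alt graph := by
  unfold getAccumulateList getAccumulateList_alt
  have h1 : (List.range graph.length).foldl (fun acc i => acc ++ [|graph.getD i 0|]) []
      = graph.map (fun x => |x|) := by
    have := loopA1 graph [] []
    simpa [List.range_eq_range'] using this
  rw [loopB graph [] (graph.foldl (fun s x => s + |x|) 0), sumAbs graph 0, h1]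
  simp only [List.nil_append, List.reverse_reverse, Int.zero_add, Int.sub_self]
  cases h : graph.map (fun x => |x|) with
  | nil => simp [pfx]
  | cons a tl =>
    simp only [List.length_cons, List.range_eq_range', List.range'_succ, List.foldl_cons,
      if_neg (by omega : ¬ (0 > 0))]
    have := loopA2 tl [a] a (by simp) (by simp)
    simp only [List.length_cons, List.length_nil] at this
    simpa [pfx] using this

-- ===== VERDICT (by name: the statement is the Claim_ definition above) =====
theorem getAccumulateList_spec : Claim_equal_getAccumulateList := by
  intro graph _
  unfold Spec_getAccumulateList
  exact ports_eq graph
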